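-- pv_equiv track=rewrite | github.com/mathorlee/leetcode-clt | acs/minimum-space-wasted-from-packaging.py | calculate_cuts
-- ===== SOURCE A (Python) =====
-- def calculate_cuts(packages: list[int], boxes: list[list[int]]) -> int:
--     # begin
--     from bisect import bisect_right
--     from math import inf
--
--     n = len(packages)
--     packages.sort()
--
--     def cal_waste(box: list[int]):
--         res = 0
--         i = 0
--         for v in box:
--             j = bisect_right(packages, v)
--             if j > i:
--                 res += (j - i) * v
--             i = j
--             if i >= n:
--                 break
--         return inf if i < n else res
--
--     res = inf
--     for _ in boxes:
--         _.sort()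
--         res = min(cal_waste(_), res)
--     return -1 if res == inf else (res - sum(packages)) % (10**9 + 7)
-- ===== SOURCE B (Python) =====
-- from bisect import bisect_left
--
--
-- def calculate_cuts(packages: list[int], boxes: list[list[int]]) -> int:
--     # Same in-place mutation as A: sorts packages and each boxes sublist.
--     packages.sort()
--     best = None
--     for bs in boxes:
--         bs.sort()
--         m = len(bs)
--         cap = 0
--         ok = True
--         for p in packages:
--             k = bisect_left(bs, p)
--             if k == m:
--                 ok = False
--                 break
--             cap += bs[k]
--         if ok and (best is None or cap < best):
--             best = cap
--     return -1 if best is None else (best - sum(packages)) % (10 ** 9 + 7)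
-- ===== Notes on version B (the rewrite author's own statement) =====
-- stated objective: alternative
-- what changed: B transposes the matching: instead of A's loop over each supplier's sorted boxes that counts covered packages via bisect_right into the packages (accumulating count*value with a float('inf') sentinel and min()), B binary-searches each package into the supplier's sorted box list (bisect_left) and sums the chosen box capacities, skipping infeasible suppliers with an Optional best accumulator.
import Mathlib
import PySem

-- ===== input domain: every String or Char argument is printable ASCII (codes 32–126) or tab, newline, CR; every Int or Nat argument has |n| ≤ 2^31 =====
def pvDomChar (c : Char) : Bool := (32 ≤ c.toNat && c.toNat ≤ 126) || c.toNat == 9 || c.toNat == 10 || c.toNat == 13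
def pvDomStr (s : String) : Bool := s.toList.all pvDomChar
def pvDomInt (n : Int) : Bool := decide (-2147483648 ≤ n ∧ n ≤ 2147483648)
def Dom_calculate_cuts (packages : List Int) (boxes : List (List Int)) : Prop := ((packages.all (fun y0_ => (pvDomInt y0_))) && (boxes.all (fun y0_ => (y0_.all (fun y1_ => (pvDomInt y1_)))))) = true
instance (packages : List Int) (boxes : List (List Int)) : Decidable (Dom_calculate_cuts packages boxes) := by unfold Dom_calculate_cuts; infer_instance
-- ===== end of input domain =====

-- B transposes A's matching: A walks each supplier's sorted boxes counting covered packages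
-- (bisect_right into packages, inf sentinel, min()); B binary-searches each package into the
-- supplier's sorted box list (bisect_left) and sums the chosen box capacities (objective:
-- alternative). Both Pythons sort `packages` and each `boxes` sublist in place — the mutations
-- are identical in A and B; the equivalence proved here is about the return value.

-- ===== PORT A =====
-- cal_waste: loop over box with state (res, i); `none` models float('inf') (infeasible).
-- bisect_right is ported as PySem.List.bisectRight.
def pvCalWasteA (pk : List Int) (n : Nat) : List Int → Int → Nat → Option Int
  | [], res, i => if i < n then none else some res
  | v :: rest, res, i =>
    let j := PySem.List.bisectRight pk v
    let res' := if j > i then res + ((j : Int) - (i : Int)) * v else res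
    if j ≥ n then (if j < n then none else some res')
    else pvCalWasteA pk n rest res' j

-- Python min over {int, inf}; inf = none
def pvOptMin : Option Int → Option Int → Option Int
  | none, b => b
  | some x, none => some x
  | some x, some y => some (min x y)

def calculate_cuts (packages : List Int) (boxes : List (List Int)) : Int :=
  let n := packages.length
  let pk := PySem.List.sorted packages (fun x => x)
  let res := boxes.foldl (fun res box =>
    pvOptMin (pvCalWasteA pk n (PySem.List.sorted box (fun x => x)) 0 0) res) none
  match res with
  | none => -1
  | some r => PySem.Int.mod (r - pk.sum) (10 ^ 9 + 7)

-- ===== PORT B =====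
-- B's inner for-loop over the sorted packages: bisect_left of each package into the sorted
-- box list, summing the chosen box capacities; `none` models the `ok = False` break
-- (the package fits in no box; in Python `k == m`, i.e. ¬ k < m since bisect_left ≤ m).
def pvCalWasteB (bs : List Int) : List Int → Int → Option Int
  | [], cap => some cap
  | p :: ps, cap =>
    let k := PySem.List.bisectLeft bs p
    if h : k < bs.length then pvCalWasteB bs ps (cap + bs[k]) else none

def calculate_cuts_alt (packages : List Int) (boxes : List (List Int)) : Int :=
  let pk := PySem.List.sorted packages (fun x => x)
  let best := boxes.foldl (fun best box =>
    let bs := PySem.List.sorted box (fun x => x)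
    match pvCalWasteB bs pk 0 with
    | none => best
    | some cap =>
      match best with
      | none => some cap
      | some b => if cap < b then some cap else best) none
  match best with
  | none => -1
  | some r => PySem.Int.mod (r - pk.sum) (10 ^ 9 + 7)

-- ===== PRECONDITION & SPEC =====
def Spec_calculate_cuts (packages : List Int) (boxes : List (List Int)) (out : Int) : Prop := out = calculate_cuts_alt packages boxes
instance (packages : List Int) (boxes : List (List Int)) (out : Int) : Decidable (Spec_calculate_cuts packages boxes out) := by unfold Spec_calculate_cuts; infer_instance

-- ===== CLAIM (what is proved, stated in full; the proofs are below) =====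
def Claim_equal_calculate_cuts : Prop := ∀ (packages : List Int) (boxes : List (List Int)), Dom_calculate_cuts packages boxes → Spec_calculate_cuts packages boxes (calculate_cuts packages boxes)

-- ===== LEMMAS AND PROOFS =====

-- common specification: sum over the packages of the first (= smallest, when sorted) box
-- that fits each package, `none` if some package fits in no box
def pvAssign (bs : List Int) : List Int → Option Int
  | [] => some 0
  | p :: ps =>
    match bs.find? (fun b => decide (p ≤ b)), pvAssign bs ps with
    | some b, some s => some (b + s)
    | _, _ => none

lemma pvFind_first : ∀ (l : List Int) (p : Int) (k : Nat) (hk : k < l.length),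
    (∀ (j : Nat) (hj : j < l.length), j < k → l[j] < p) → p ≤ l[k] →
    l.find? (fun b => decide (p ≤ b)) = some l[k]
  | [], _, k, hk, _, _ => absurd hk (by simp)
  | b :: t, p, 0, _, _, hat => by
    exact List.find?_cons_of_pos (by simpa using hat)
  | b :: t, p, (k+1), hk, hbef, hat => by
    have hb : b < p := by simpa using hbef 0 (by simp) (by omega)
    rw [List.find?_cons_of_neg (by simp; omega)]
    have := pvFind_first t p k (by simpa using Nat.lt_of_succ_lt_succ hk)
      (fun j hj hjk => by simpa using hbef (j+1) (by simpa using Nat.succ_lt_succ hj) (by omega))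
      (by simpa using hat)
    simpa using this

lemma pvFind_bisectLeft (bs : List Int) (hbs : bs.Pairwise (· ≤ ·)) (p : Int) :
    bs.find? (fun b => decide (p ≤ b)) = bs[PySem.List.bisectLeft bs p]? := by
  obtain ⟨hle, hlt, hge⟩ := PySem.List.bisectLeft_spec bs p hbs
  by_cases hk : PySem.List.bisectLeft bs p < bs.length
  · rw [List.getElem?_eq_getElem hk]
    exact pvFind_first bs p _ hk (fun j hj hjk => hlt j hj hjk) (hge _ hk (le_refl _))
  · rw [List.getElem?_eq_none (by omega)]
    refine List.find?_eq_none.mpr ?_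
    intro x hx
    obtain ⟨t, ht, rfl⟩ := List.mem_iff_getElem.mp hx
    have := hlt t ht (by omega)
    simp only [decide_eq_true_eq]
    omega

lemma pvAssign_skip (v : Int) (rest : List Int) : ∀ (ps : List Int), (∀ p ∈ ps, v < p) →
    pvAssign (v :: rest) ps = pvAssign rest ps
  | [], _ => rfl
  | p :: ps, h => by
    have hv : v < p := h p List.mem_cons_self
    rw [pvAssign, pvAssign,
      List.find?_cons_of_neg (by simp; omega),
      pvAssign_skip v rest ps (fun q hq => h q (List.mem_cons_of_mem _ hq))]

lemma pvAssign_append (bs : List Int) : ∀ (xs ys : List Int),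
    pvAssign bs (xs ++ ys) =
      match pvAssign bs xs, pvAssign bs ys with
      | some a, some b => some (a + b)
      | _, _ => none
  | [], ys => by
    cases h : pvAssign bs ys <;> simp [pvAssign, h]
  | x :: xs, ys => by
    cases hf : bs.find? (fun b => decide (x ≤ b)) <;>
      cases hxs : pvAssign bs xs <;> cases hys : pvAssign bs ys <;>
        (simp [pvAssign, hf, pvAssign_append bs xs ys, hxs, hys]; try ring)

lemma pvAssign_const (bs : List Int) (v : Int) : ∀ (xs : List Int),
    (∀ p ∈ xs, bs.find? (fun b => decide (p ≤ b)) = some v) →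
    pvAssign bs xs = some ((xs.length : Int) * v)
  | [], _ => by simp [pvAssign]
  | p :: ps, h => by
    rw [pvAssign, h p List.mem_cons_self,
      pvAssign_const bs v ps (fun q hq => h q (List.mem_cons_of_mem _ hq))]
    simp only [List.length_cons]
    congr 1
    push_cast
    ring

-- B's inner loop computes pvAssign (shifted by the accumulator)
lemma calWasteB_eq (bs : List Int) (hbs : bs.Pairwise (· ≤ ·)) : ∀ (ps : List Int) (cap : Int),
    pvCalWasteB bs ps cap = (pvAssign bs ps).map (fun s => cap + s)
  | [], cap => by simp [pvCalWasteB, pvAssign]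
  | p :: ps, cap => by
    have hfind := pvFind_bisectLeft bs hbs p
    rw [pvCalWasteB]
    by_cases hk : PySem.List.bisectLeft bs p < bs.length
    · rw [dif_pos hk, calWasteB_eq bs hbs ps _]
      have hsome : bs.find? (fun b => decide (p ≤ b)) = some bs[PySem.List.bisectLeft bs p] :=
        hfind.trans (List.getElem?_eq_getElem hk)
      cases h : pvAssign bs ps <;> (simp [pvAssign, hsome, h]; try ring)
    · rw [dif_neg hk]
      have hnone : bs.find? (fun b => decide (p ≤ b)) = none :=
        hfind.trans (List.getElem?_eq_none (by omega))
      cases h : pvAssign bs ps <;> simp [pvAssign, hnone, h]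

lemma bisectRight_mono (pk : List Int) (hpk : pk.Pairwise (· ≤ ·)) {v v' : Int} (hv : v ≤ v') :
    PySem.List.bisectRight pk v ≤ PySem.List.bisectRight pk v' := by
  obtain ⟨hle, hlt, _⟩ := PySem.List.bisectRight_spec pk v hpk
  obtain ⟨hle', _, hgt'⟩ := PySem.List.bisectRight_spec pk v' hpk
  by_contra h
  rw [not_le] at h
  have hL : PySem.List.bisectRight pk v' < pk.length := lt_of_lt_of_le h hle
  have h1 := hlt _ hL h
  have h2 := hgt' _ hL (le_refl _)
  omega

-- A's inner loop computes pvAssign of the remaining packages (shifted by the accumulator)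
lemma calWasteA_eq (pk : List Int) (hpk : pk.Pairwise (· ≤ ·)) :
    ∀ (bs : List Int), bs.Pairwise (· ≤ ·) → ∀ (res : Int) (i : Nat),
      (∀ b ∈ bs, i ≤ PySem.List.bisectRight pk b) →
      pvCalWasteA pk pk.length bs res i = (pvAssign bs (pk.drop i)).map (fun s => res + s) := by
  intro bs
  induction bs with
  | nil =>
    intro _ res i _
    by_cases hi : i < pk.length
    · rw [List.drop_eq_getElem_cons hi]
      simp [pvCalWasteA, pvAssign, hi]
    · rw [List.drop_eq_nil_of_le (by omega)]
      simp [pvCalWasteA, pvAssign, hi]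
  | cons v rest ih =>
    intro hsorted res i hbnd
    obtain ⟨hle, hlt, hgt⟩ := PySem.List.bisectRight_spec pk v hpk
    set j := PySem.List.bisectRight pk v with hj
    have hij : i ≤ j := hbnd v List.mem_cons_self
    obtain ⟨hhead, hrest⟩ := List.pairwise_cons.mp hsorted
    have hdecomp : pk.drop i = (pk.drop i).take (j - i) ++ pk.drop j := by
      conv_lhs => rw [← List.take_append_drop (j - i) (pk.drop i)]
      rw [List.drop_drop]
      have hieq : i + (j - i) = j := by omega
      rw [hieq]
    have hseglen : ((pk.drop i).take (j - i)).length = j - i := by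
      simp only [List.length_take, List.length_drop]
      omega
    have hsegfind : ∀ p ∈ (pk.drop i).take (j - i),
        (v :: rest).find? (fun b => decide (p ≤ b)) = some v := by
      intro p hp
      obtain ⟨t, ht, hteq⟩ := List.mem_iff_getElem.mp hp
      have ht' : t < j - i := by rw [hseglen] at ht; exact ht
      have hitlen : i + t < pk.length := by omega
      have hidx : ((pk.drop i).take (j - i))[t] = pk[i + t] := by
        rw [List.getElem_take, List.getElem_drop]
      have hple : p ≤ v := by
        rw [← hteq, hidx]
        exact hlt (i + t) hitlen (by omega)
      exact List.find?_cons_of_pos (by simpa using hple)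
    have htail : ∀ p ∈ pk.drop j, v < p := by
      intro p hp
      obtain ⟨t, ht, hteq⟩ := List.mem_iff_getElem.mp hp
      have htlen : j + t < pk.length := by
        have := List.length_drop (l := pk) (i := j)
        omega
      have hidx : (pk.drop j)[t] = pk[j + t] := List.getElem_drop
      rw [← hteq, hidx]
      exact hgt (j + t) htlen (by omega)
    have hassign : pvAssign (v :: rest) (pk.drop i)
        = (pvAssign rest (pk.drop j)).map (fun s => ((j : Int) - (i : Int)) * v + s) := by
      rw [hdecomp, pvAssign_append, pvAssign_const _ v _ hsegfind, pvAssign_skip v rest _ htail,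
        hseglen]
      have hc : ((j - i : Nat) : Int) = (j : Int) - (i : Int) := by
        push_cast [Nat.cast_sub hij]
        ring
      rw [hc]
      cases pvAssign rest (pk.drop j) <;> rfl
    have hres' : (if j > i then res + ((j : Int) - (i : Int)) * v else res)
        = res + ((j : Int) - (i : Int)) * v := by
      split_ifs with h
      · rfl
      · have : j = i := by omega
        simp [this]
    rw [pvCalWasteA]
    simp only [← hj, hres']
    by_cases hjn : j ≥ pk.length
    · have hjeq : j = pk.length := by omega
      rw [if_pos hjn, if_neg (by omega), hassign,
        List.drop_eq_nil_of_le (by omega)]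
      simp only [pvAssign, Option.map_some]
      congr 1
      rw [hjeq]
      ring
    · rw [if_neg hjn,
        ih hrest (res + ((j : Int) - (i : Int)) * v) j
          (fun b hb => hj ▸ bisectRight_mono pk hpk (hhead b hb)),
        hassign]
      cases pvAssign rest (pk.drop j) <;> (simp; try ring)

-- per-supplier accumulator update: A's min(cal_waste, res) equals B's conditional best update
lemma step_eq (pk : List Int) (hpk : pk.Pairwise (· ≤ ·)) (box : List Int) (best : Option Int) :
    pvOptMin (pvCalWasteA pk pk.length (PySem.List.sorted box (fun x => x)) 0 0) best =
      (match pvCalWasteB (PySem.List.sorted box (fun x => x)) pk 0 with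
       | none => best
       | some cap =>
         match best with
         | none => some cap
         | some b => if cap < b then some cap else best) := by
  have hbox : (PySem.List.sorted box (fun x => x)).Pairwise (· ≤ ·) :=
    PySem.List.sorted_pairwise box (fun x => x)
  rw [calWasteA_eq pk hpk _ hbox 0 0 (fun _ _ => Nat.zero_le _),
    calWasteB_eq _ hbox pk 0]
  simp only [List.drop_zero]
  cases pvAssign (PySem.List.sorted box (fun x => x)) pk with
  | none => cases best <;> rfl
  | some s =>
    cases best with
    | none => rfl
    | some b =>
      simp only [Option.map_some, pvOptMin, zero_add]
      rcases lt_trichotomy s b with h | h | h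
      · rw [min_eq_left (le_of_lt h), if_pos h]
      · rw [if_neg (by omega), h, min_self]
      · rw [min_eq_right (le_of_lt h), if_neg (by omega)]

-- ===== VERDICT (by name: the statement is the Claim_ definition above) =====
theorem calculate_cuts_spec : Claim_equal_calculate_cuts := by
  intro packages boxes _
  unfold Spec_calculate_cuts calculate_cuts calculate_cuts_alt
  have hpk : (PySem.List.sorted packages (fun x => x)).Pairwise (· ≤ ·) :=
    PySem.List.sorted_pairwise packages (fun x => x)
  have hlen : packages.length = (PySem.List.sorted packages (fun x => x)).length :=
    (PySem.List.length_sorted packages (fun x => x) false).symm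
  simp only [hlen]
  congr 1
  have key : ∀ (bs : List (List Int)) (acc : Option Int),
      bs.foldl (fun res box =>
        pvOptMin (pvCalWasteA (PySem.List.sorted packages (fun x => x))
          (PySem.List.sorted packages (fun x => x)).length
          (PySem.List.sorted box (fun x => x)) 0 0) res) acc =
      bs.foldl (fun best box =>
        match pvCalWasteB (PySem.List.sorted box (fun x => x))
          (PySem.List.sorted packages (fun x => x)) 0 with
        | none => best
        | some cap =>
          match best with
          | none => some cap
          | some b => if cap < b then some cap else best) acc := by
    intro bs
    induction bs with
    | nil => intro acc; rfl
    | cons b t ih =>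
      intro acc
      simp only [List.foldl_cons]
      rw [step_eq _ hpk b acc]
      exact ih _
  exact key boxes none
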